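-- pv_equiv track=rewrite | github.com/mariotv3/Scalable_Duplicate_Detection_MSMPplusplus | src/lsh/minhashing.py | shingles_to_ints_local
-- ===== SOURCE A (Python) =====
-- from typing import Dict, List, Tuple, Iterable, Set
--
-- def shingles_to_ints_local(
--     shingles: Iterable[str],
--     shingle_to_id: Dict[str, int],
-- ) -> Set[int]:
--     out = set()
--     for s in sorted(shingles):
--         if s not in shingle_to_id:
--             shingle_to_id[s] = len(shingle_to_id)
--         out.add(shingle_to_id[s])
--     return out
-- ===== SOURCE B (Python) =====
-- def shingles_to_ints_local(shingles, shingle_to_id):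
--     lst = list(shingles)
--     distinct = sorted(set(lst))                 # only the distinct shingles are sorted
--     fresh = [s for s in distinct if s not in shingle_to_id]   # sorted, duplicate-free
--     base = len(shingle_to_id)
--
--     def rank(s):
--         # binary search: number of fresh shingles strictly below s
--         lo, hi = 0, len(fresh)
--         while lo < hi:
--             mid = (lo + hi) // 2
--             if fresh[mid] < s:
--                 lo = mid + 1
--             else:
--                 hi = mid
--         return lo
--
--     out = {shingle_to_id[s] if s in shingle_to_id else base + rank(s) for s in distinct}
--     shingle_to_id.update((s, base + i) for i, s in enumerate(fresh))
--     return out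
-- ===== Notes on version B (the rewrite author's own statement) =====
-- stated objective: alternative
-- what changed: A runs one stateful loop over the fully sorted multiset, mutating the dict and a size-based counter as it goes; B never sorts the full input and keeps no running counter: it sorts only the distinct shingles, computes each new shingle's id statelessly as base + its rank found by binary search in the sorted fresh array, and bulk-updates the dict afterwards.
import Mathlib
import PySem

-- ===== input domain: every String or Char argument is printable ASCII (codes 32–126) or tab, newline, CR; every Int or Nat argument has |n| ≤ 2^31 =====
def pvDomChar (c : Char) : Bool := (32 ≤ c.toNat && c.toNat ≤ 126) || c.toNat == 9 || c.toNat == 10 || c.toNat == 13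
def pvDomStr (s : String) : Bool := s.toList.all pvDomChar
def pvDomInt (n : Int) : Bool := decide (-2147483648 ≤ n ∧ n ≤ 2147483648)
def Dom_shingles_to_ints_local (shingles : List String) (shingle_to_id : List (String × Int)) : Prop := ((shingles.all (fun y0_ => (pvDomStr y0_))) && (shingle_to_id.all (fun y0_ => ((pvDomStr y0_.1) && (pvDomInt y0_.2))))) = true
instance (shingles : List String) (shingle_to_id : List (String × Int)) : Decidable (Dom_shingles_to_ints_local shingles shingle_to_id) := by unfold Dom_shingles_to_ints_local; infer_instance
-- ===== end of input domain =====

-- B drops A's stateful loop over the fully sorted multiset: it sorts only the distinct shingles and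
-- computes new ids statelessly as base + binary-search rank in the sorted fresh array.
-- Both Pythons mutate shingle_to_id to the same final dict; the equivalence proved is about the return value.

-- ===== PORT A =====
-- single loop over sorted(shingles), conditional insert + out.add per element
def shingles_to_ints_local (shingles : List String) (shingle_to_id : List (String × Int)) : List Int :=
  let st := (PySem.List.sorted shingles (fun x => x) false).foldl
    (fun (st : PySem.Dict String Int × PySem.Set Int) s =>
      let d := if st.1.contains s then st.1 else st.1.insert s ((st.1.size : Int))
      (d, PySem.Set.add st.2 (d.getD s 0)))
    (PySem.Dict.ofList shingle_to_id, PySem.Set.empty)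
  st.2

-- ===== PORT B =====
-- 'while lo < hi: mid = (lo+hi)//2; …' of Source B's rank(); in every call lo < hi ≤ len fresh, so
-- fresh[mid] is in range and getD's default is unreachable (exact port of the in-range indexing)
-- fuel = an upper bound on hi - lo (each step at least halves the interval), making the
-- recursion structural; the top-level call passes fuel = len fresh, which is never exhausted
def pvBisect (fresh : List String) (s : String) : Nat → Nat → Nat → Nat
  | 0, lo, _ => lo
  | fuel + 1, lo, hi =>
    if lo < hi then
      let mid := (lo + hi) / 2
      if fresh.getD mid "" < s then pvBisect fresh s fuel (mid + 1) hi
      else pvBisect fresh s fuel lo mid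
    else lo

-- distinct = sorted(set(lst)); fresh = the sorted unseen shingles; ids: old lookup or base + rank(s)
def shingles_to_ints_local_alt (shingles : List String) (shingle_to_id : List (String × Int)) : List Int :=
  let d0 := PySem.Dict.ofList shingle_to_id
  let distinct := PySem.List.sorted (PySem.Set.ofList shingles) (fun x => x) false
  let fresh := distinct.filter (fun s => ! d0.contains s)
  let base : Int := (d0.size : Int)
  PySem.Set.ofList (distinct.map (fun s =>
    if d0.contains s then d0.getD s 0 else base + (pvBisect fresh s fresh.length 0 fresh.length : Int)))

-- ===== PRECONDITION & SPEC =====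
def Spec_shingles_to_ints_local (shingles : List String) (shingle_to_id : List (String × Int)) (out : List Int) : Prop := out = shingles_to_ints_local_alt shingles shingle_to_id
instance (shingles : List String) (shingle_to_id : List (String × Int)) (out : List Int) : Decidable (Spec_shingles_to_ints_local shingles shingle_to_id out) := by unfold Spec_shingles_to_ints_local; infer_instance

-- ===== CLAIM (what is proved, stated in full; the proofs are below) =====
def Claim_equal_shingles_to_ints_local : Prop := ∀ (shingles : List String) (shingle_to_id : List (String × Int)), Dom_shingles_to_ints_local shingles shingle_to_id → Spec_shingles_to_ints_local shingles shingle_to_id (shingles_to_ints_local shingles shingle_to_id)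

-- ===== LEMMAS AND PROOFS =====

-- A's dictionary loop, as a standalone fold (proof helper)
def pvExtend (d : PySem.Dict String Int) (L : List String) : PySem.Dict String Int :=
  L.foldl (fun d s => if d.contains s then d else d.insert s ((d.size : Int))) d

-- A's loop body (proof helper; definitionally the lambda in port A's fold)
def pvStep (st : PySem.Dict String Int × PySem.Set Int) (s : String) :
    PySem.Dict String Int × PySem.Set Int :=
  let e := if st.1.contains s then st.1 else st.1.insert s ((st.1.size : Int))
  (e, PySem.Set.add st.2 (e.getD s 0))

-- A's loop never touches an existing key, so lookups of present keys are stable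
theorem pvExtend_getD (L : List String) (d : PySem.Dict String Int) (s : String)
    (h : d.contains s = true) : (pvExtend d L).getD s 0 = d.getD s 0 := by
  induction L generalizing d with
  | nil => rfl
  | cons t rest ih =>
    by_cases ht : d.contains t = true
    · have hstep : pvExtend d (t :: rest) = pvExtend d rest := by simp [pvExtend, ht]
      rw [hstep]; exact ih d h
    · have ht' : d.contains t = false := by simpa using ht
      have hstep : pvExtend d (t :: rest) = pvExtend (d.insert t ((d.size : Int))) rest := by
        simp [pvExtend, ht']
      have hne : s ≠ t := fun hst => by rw [hst, ht'] at h; cases h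
      have h' : (d.insert t ((d.size : Int))).contains s = true := by
        rw [PySem.Dict.contains_insert]; simp [h]
      rw [hstep, ih _ h']
      simp [PySem.Dict.getD_insert, hne]

-- A's output accumulation equals adding the FINAL dictionary's values along the same list
theorem pvOut_eq (L : List String) (d : PySem.Dict String Int) (out : PySem.Set Int) :
    (L.foldl pvStep (d, out)).2
    = L.foldl (fun o s => PySem.Set.add o ((pvExtend d L).getD s 0)) out := by
  induction L generalizing d out with
  | nil => rfl
  | cons s rest ih =>
    by_cases hc : d.contains s = true
    · have h1 : pvStep (d, out) s = (d, PySem.Set.add out (d.getD s 0)) := by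
        simp [pvStep, hc]
      have h2 : pvExtend d (s :: rest) = pvExtend d rest := by simp [pvExtend, hc]
      rw [List.foldl_cons, h1, ih, List.foldl_cons, h2, pvExtend_getD rest d s hc]
    · have hc' : d.contains s = false := by simpa using hc
      have h1 : pvStep (d, out) s
          = (d.insert s ((d.size : Int)),
             PySem.Set.add out ((d.insert s ((d.size : Int))).getD s 0)) := by
        simp [pvStep, hc']
      have h2 : pvExtend d (s :: rest) = pvExtend (d.insert s ((d.size : Int))) rest := by
        simp [pvExtend, hc']
      have hcd : (d.insert s ((d.size : Int))).contains s = true :=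
        PySem.Dict.contains_insert_self ..
      rw [List.foldl_cons, h1, ih, List.foldl_cons, h2,
        pvExtend_getD rest (d.insert s ((d.size : Int))) s hcd]

-- dedup of a cons (first-occurrence dedup)
theorem pvFoldlAdd_eq {α : Type} [BEq α] [LawfulBEq α] (xs : List α) (acc : List α) :
    List.foldl PySem.Set.add acc xs
    = acc ++ (PySem.List.dedup xs).filter (fun t => ! acc.contains t) := by
  induction xs generalizing acc with
  | nil => simp [PySem.List.dedup, PySem.Set.ofList]
  | cons x xs ih =>
    have hx : PySem.List.dedup (x :: xs)
        = List.foldl PySem.Set.add (PySem.Set.add [] x) xs := by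
      simp [PySem.List.dedup_eq_ofList, PySem.Set.ofList_eq_foldl]
    have haddnil : PySem.Set.add ([] : List α) x = [x] := rfl
    rw [List.foldl_cons, ih, hx, haddnil, ih]
    by_cases hc : x ∈ acc
    · have hadd : PySem.Set.add acc x = acc := by simp [PySem.Set.add, hc]
      rw [hadd]
      simp only [List.filter_append, List.filter_filter]
      have h1 : List.filter (fun t => ! acc.contains t) [x] = [] := by simp [hc]
      rw [h1, List.nil_append]
      congr 1
      apply List.filter_congr
      intro t _
      by_cases hte : t = x
      · subst hte; simp [hc]
      · simp [hte]
    · have hadd : PySem.Set.add acc x = acc ++ [x] := by simp [PySem.Set.add, hc]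
      rw [hadd, List.append_assoc]
      congr 1
      simp only [List.filter_append, List.filter_filter]
      have h1 : List.filter (fun t => ! acc.contains t) [x] = [x] := by simp [hc]
      rw [h1]
      congr 1
      apply List.filter_congr
      intro t _
      by_cases hte : t = x
      · subst hte; simp [hc]
      · simp [hte]

theorem pvDedup_cons {α : Type} [BEq α] [LawfulBEq α] (x : α) (xs : List α) :
    PySem.List.dedup (x :: xs) = x :: (PySem.List.dedup xs).filter (fun t => ! (t == x)) := by
  have h : PySem.List.dedup (x :: xs) = List.foldl PySem.Set.add [x] xs := by
    simp [PySem.List.dedup_eq_ofList, PySem.Set.ofList_eq_foldl]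
  rw [h, pvFoldlAdd_eq]
  simp

-- first-occurrence dedup is a sublist
theorem pvDedup_sublist {α : Type} [BEq α] [LawfulBEq α] (xs : List α) :
    (PySem.List.dedup xs).Sublist xs := by
  induction xs with
  | nil => simp [PySem.List.dedup, PySem.Set.ofList]
  | cons x rest ih =>
    rw [pvDedup_cons]
    exact List.Sublist.cons₂ x (List.Sublist.trans List.filter_sublist ih)

-- two strictly increasing lists with the same members are equal
theorem pvStrictEq {α : Type} [LinearOrder α] (l₁ l₂ : List α)
    (h₁ : l₁.Pairwise (· < ·)) (h₂ : l₂.Pairwise (· < ·))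
    (hm : ∀ x, x ∈ l₁ ↔ x ∈ l₂) : l₁ = l₂ := by
  induction l₁ generalizing l₂ with
  | nil =>
    cases l₂ with
    | nil => rfl
    | cons b t => exact absurd ((hm b).2 (List.mem_cons_self ..)) (List.not_mem_nil)
  | cons a t₁ ih =>
    cases l₂ with
    | nil => exact absurd ((hm a).1 (List.mem_cons_self ..)) (List.not_mem_nil)
    | cons b t₂ =>
      have hab : a = b := by
        have ha2 : a ∈ b :: t₂ := (hm a).1 (List.mem_cons_self ..)
        have hb1 : b ∈ a :: t₁ := (hm b).2 (List.mem_cons_self ..)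
        rcases List.mem_cons.mp ha2 with h | h
        · exact h
        · rcases List.mem_cons.mp hb1 with h' | h'
          · exact h'.symm
          · have hba : b < a := (List.pairwise_cons.mp h₂).1 a h
            have hab : a < b := (List.pairwise_cons.mp h₁).1 b h'
            exact absurd (hab.trans hba) (lt_irrefl a)
      subst hab
      have ht : t₁ = t₂ := by
        apply ih t₂ (List.pairwise_cons.mp h₁).2 (List.pairwise_cons.mp h₂).2
        intro x
        constructor
        · intro hx
          have hax : a < x := (List.pairwise_cons.mp h₁).1 x hx
          rcases List.mem_cons.mp ((hm x).1 (List.mem_cons_of_mem _ hx)) with h | h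
          · exact absurd (h ▸ hax) (lt_irrefl a)
          · exact h
        · intro hx
          have hax : a < x := (List.pairwise_cons.mp h₂).1 x hx
          rcases List.mem_cons.mp ((hm x).2 (List.mem_cons_of_mem _ hx)) with h | h
          · exact absurd (h ▸ hax) (lt_irrefl a)
          · exact h
      rw [ht]

-- sorted(set(xs)) = dedup of sorted(xs)
theorem pvDistinct_eq (shingles : List String) :
    PySem.List.sorted (PySem.Set.ofList shingles) (fun x => x) false
      = PySem.List.dedup (PySem.List.sorted shingles (fun x => x) false) := by
  apply pvStrictEq
  · exact PySem.List.sorted_ofList_pairwise_lt ..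
  · have hle : (PySem.List.sorted shingles (fun x => x) false).Pairwise (· ≤ ·) := by
      have := PySem.List.sorted_pairwise shingles (fun x => x)
      simpa using this
    have hsub := pvDedup_sublist (PySem.List.sorted shingles (fun x => x) false)
    have hnd := PySem.List.nodup_dedup (PySem.List.sorted shingles (fun x => x) false)
    have hle' := hle.sublist hsub
    have := List.Pairwise.and hle' hnd
    exact this.imp (fun ⟨h1, h2⟩ => lt_of_le_of_ne h1 h2)
  · intro x
    rw [PySem.List.mem_sorted, PySem.Set.mem_ofList, PySem.List.mem_dedup,
      PySem.List.mem_sorted]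

-- adding images of elements whose image is already present is a no-op
theorem pvMapFoldlSkip {α β : Type} [BEq α] [LawfulBEq α] [BEq β] [LawfulBEq β]
    (f : α → β) (x : α) (m : List α) :
    ∀ acc : List β, f x ∈ acc →
      List.foldl PySem.Set.add acc (m.map f)
        = List.foldl PySem.Set.add acc ((m.filter (fun t => ! (t == x))).map f) := by
  induction m with
  | nil => intro acc _; rfl
  | cons y r ih =>
    intro acc hmem
    by_cases hyx : y = x
    · subst hyx
      have hadd : PySem.Set.add acc (f y) = acc := by simp [PySem.Set.add, hmem]
      simp only [List.map_cons, List.foldl_cons, hadd, List.filter_cons]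
      rw [if_neg (by simp)]
      exact ih acc hmem
    · simp only [List.map_cons, List.foldl_cons, List.filter_cons]
      rw [if_pos (by simp [hyx])]
      simp only [List.map_cons, List.foldl_cons]
      apply ih
      simp [PySem.Set.mem_add, hmem]

-- set(map f l) (as an insertion-ordered list) only depends on dedup l
theorem pvOfListMapDedup {α β : Type} [BEq α] [LawfulBEq α] [BEq β] [LawfulBEq β]
    (f : α → β) (l : List α) :
    PySem.Set.ofList (l.map f) = PySem.Set.ofList ((PySem.List.dedup l).map f) := by
  suffices h : ∀ acc : List β,
      List.foldl PySem.Set.add acc (l.map f)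
        = List.foldl PySem.Set.add acc ((PySem.List.dedup l).map f) by
    rw [PySem.Set.ofList_eq_foldl, PySem.Set.ofList_eq_foldl]
    exact h []
  induction l with
  | nil => intro acc; rfl
  | cons x r ih =>
    intro acc
    rw [pvDedup_cons]
    simp only [List.map_cons, List.foldl_cons]
    rw [ih (PySem.Set.add acc (f x))]
    apply pvMapFoldlSkip
    simp [PySem.Set.mem_add]

-- sequential size-indexed inserts over fresh distinct keys: the i-th key gets id size + i
theorem pvExtend_getD_new (N : List String) : ∀ (d : PySem.Dict String Int) (s : String),
    N.Nodup → (∀ t ∈ N, d.contains t = false) → s ∈ N →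
    (pvExtend d N).getD s 0 = (d.size : Int) + (N.idxOf s : Int) := by
  induction N with
  | nil => intro d s _ _ hs; exact absurd hs (List.not_mem_nil)
  | cons t rest ih =>
    intro d s hnd hf hs
    have hft : d.contains t = false := hf t (List.mem_cons_self ..)
    have hstep : pvExtend d (t :: rest) = pvExtend (d.insert t ((d.size : Int))) rest := by
      simp [pvExtend, hft]
    set d' := d.insert t ((d.size : Int)) with hd'
    have hsz : d'.size = d.size + 1 := by
      rw [hd', PySem.Dict.size_insert, if_neg (by simp [hft])]
    by_cases hst : s = t
    · subst hst
      have hc : d'.contains s = true := PySem.Dict.contains_insert_self ..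
      rw [hstep, pvExtend_getD rest d' s hc, hd', PySem.Dict.getD_insert]
      simp
    · have hsr : s ∈ rest := by
        rcases List.mem_cons.mp hs with h | h
        · exact absurd h hst
        · exact h
      have hf' : ∀ u ∈ rest, d'.contains u = false := by
        intro u hu
        have hne : u ≠ t := fun hut => (List.nodup_cons.mp hnd).1 (hut ▸ hu)
        rw [hd', PySem.Dict.contains_insert]
        simp [hne, hf u (List.mem_cons_of_mem _ hu)]
      rw [hstep, ih d' s (List.nodup_cons.mp hnd).2 hf' hsr, hsz]
      have hts : (t == s) = false := by
        simp only [beq_eq_false_iff_ne, ne_eq]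
        exact fun h => hst h.symm
      have hidx : (t :: rest).idxOf s = rest.idxOf s + 1 := by
        simp [List.idxOf_cons, hts]
      rw [hidx]
      push_cast
      ring

-- A's dictionary loop only looks at the new (absent, deduplicated) keys
theorem pvExtend_eq_filter (L : List String) (d : PySem.Dict String Int) :
    pvExtend d L = pvExtend d ((PySem.List.dedup L).filter (fun s => ! d.contains s)) := by
  induction L generalizing d with
  | nil => rfl
  | cons s rest ih =>
    rw [pvDedup_cons]
    by_cases hc : d.contains s = true
    · have h1 : pvExtend d (s :: rest) = pvExtend d rest := by simp [pvExtend, hc]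
      rw [h1, ih]
      congr 1
      simp only [List.filter_cons]
      rw [if_neg (by simp [hc]), List.filter_filter]
      apply List.filter_congr
      intro t _
      by_cases hte : t = s
      · subst hte; simp [hc]
      · simp [hte]
    · have hc' : d.contains s = false := by simpa using hc
      have h1 : pvExtend d (s :: rest) = pvExtend (d.insert s ((d.size : Int))) rest := by
        simp [pvExtend, hc']
      simp only [List.filter_cons]
      rw [if_pos (by simp [hc'])]
      have h2 : pvExtend d (s :: ((PySem.List.dedup rest).filter (fun t => ! (t == s))).filter
          (fun t => ! d.contains t))
          = pvExtend (d.insert s ((d.size : Int))) (((PySem.List.dedup rest).filter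
            (fun t => ! (t == s))).filter (fun t => ! d.contains t)) := by
        simp [pvExtend, hc']
      rw [h1, h2, ih]
      congr 1
      rw [List.filter_filter]
      apply List.filter_congr
      intro t _
      rw [PySem.Dict.contains_insert]
      by_cases hte : t = s
      · subst hte; simp
      · simp [Bool.and_comm]

-- binary-search invariant: if 'below s' holds exactly at indices < j, the search returns j
theorem pvBisect_go (fresh : List String) (s : String) (j : Nat)
    (hiff : ∀ i, i < fresh.length → (fresh.getD i "" < s ↔ i < j)) :
    ∀ (n lo hi : Nat), hi - lo ≤ n → lo ≤ j → j ≤ hi → hi ≤ fresh.length →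
      pvBisect fresh s n lo hi = j := by
  intro n
  induction n with
  | zero =>
    intro lo hi hn hlo hhi _
    simp [pvBisect]
    omega
  | succ n ih =>
    intro lo hi hn hlo hhi hlen
    rw [pvBisect]
    by_cases h : lo < hi
    · rw [if_pos h]
      set mid := (lo + hi) / 2 with hmid
      have hmr : mid < fresh.length := by omega
      by_cases hlt : fresh.getD mid "" < s
      · rw [if_pos hlt]
        have : mid < j := (hiff mid hmr).1 hlt
        exact ih (mid + 1) hi (by omega) (by omega) hhi hlen
      · rw [if_neg hlt]
        have : ¬ mid < j := fun hmj => hlt ((hiff mid hmr).2 hmj)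
        exact ih lo mid (by omega) hlo (by omega) (by omega)
    · rw [if_neg h]
      omega

-- on a strictly increasing list, the search finds the index of a member
theorem pvBisect_eq_idxOf (fresh : List String) (s : String)
    (hp : fresh.Pairwise (· < ·)) (hs : s ∈ fresh) :
    pvBisect fresh s fresh.length 0 fresh.length = fresh.idxOf s := by
  have hj : fresh.idxOf s < fresh.length := List.idxOf_lt_length_of_mem hs
  have hjs : fresh[fresh.idxOf s] = s := List.getElem_idxOf hj
  have hmono := List.pairwise_iff_getElem.mp hp
  apply pvBisect_go fresh s (fresh.idxOf s) _ fresh.length 0 fresh.length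
      (by omega) (by omega) (by omega) (by omega)
  intro i hi
  have hgetD : fresh.getD i "" = fresh[i] := by
    simp [List.getD, List.getElem?_eq_getElem hi]
  rw [hgetD]
  constructor
  · intro hlt
    by_contra hij
    have hle : fresh.idxOf s ≤ i := by omega
    rcases Nat.eq_or_lt_of_le hle with heq | hlt'
    · have hfi : fresh[i] = s := (getElem_congr_idx heq.symm).trans hjs
      rw [hfi] at hlt
      exact lt_irrefl s hlt
    · have := hmono (fresh.idxOf s) i hj hi hlt'
      rw [hjs] at this
      exact absurd (hlt.trans this) (lt_irrefl _)
  · intro hij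
    have := hmono i (fresh.idxOf s) hi hj hij
    rw [hjs] at this
    exact this

theorem shingles_to_ints_local_spec_aux (shingles : List String)
    (shingle_to_id : List (String × Int)) :
    shingles_to_ints_local shingles shingle_to_id
      = shingles_to_ints_local_alt shingles shingle_to_id := by
  unfold shingles_to_ints_local shingles_to_ints_local_alt
  set d0 := PySem.Dict.ofList shingle_to_id with hd0
  set srt := PySem.List.sorted shingles (fun x => x) false with hsrt
  set distinct := PySem.List.sorted (PySem.Set.ofList shingles) (fun x => x) false with hdst
  set g : String → Int := fun s => (pvExtend d0 srt).getD s 0 with hg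
  -- A's side: the set of final-dict values along srt
  rw [show (srt.foldl
      (fun (st : PySem.Dict String Int × PySem.Set Int) s =>
        let d := if st.1.contains s then st.1 else st.1.insert s ((st.1.size : Int))
        (d, PySem.Set.add st.2 (d.getD s 0))) (d0, PySem.Set.empty)).2
      = (srt.foldl pvStep (d0, PySem.Set.empty)).2 from rfl]
  rw [pvOut_eq srt d0 PySem.Set.empty]
  have hA : srt.foldl (fun o s => PySem.Set.add o (g s)) PySem.Set.empty
      = PySem.Set.ofList (srt.map g) := by
    rw [PySem.Set.ofList_eq_foldl, List.foldl_map]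
    rfl
  rw [hA, pvOfListMapDedup g srt, ← pvDistinct_eq shingles, ← hdst]
  -- pointwise: A's final-dict value equals B's stateless formula on every distinct shingle
  congr 1
  apply List.map_congr_left
  intro s hsmem
  set fresh := distinct.filter (fun s => ! d0.contains s) with hfr
  have hdistinct_lt : distinct.Pairwise (· < ·) := PySem.List.sorted_ofList_pairwise_lt ..
  by_cases hc : d0.contains s = true
  · rw [hg]
    simp only [pvExtend_getD srt d0 s hc, hc, if_true]
  · have hc' : d0.contains s = false := by simpa using hc
    have hsf : s ∈ fresh := by
      rw [hfr]
      exact List.mem_filter.mpr ⟨hsmem, by simp [hc']⟩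
    have hfresh_lt : fresh.Pairwise (· < ·) := hdistinct_lt.filter _
    have hfresh_nd : fresh.Nodup := hfresh_lt.imp ne_of_lt
    have hfresh_f : ∀ t ∈ fresh, d0.contains t = false := by
      intro t ht
      have := (List.mem_filter.mp (hfr ▸ ht)).2
      simpa using this
    have hNfilter : pvExtend d0 srt = pvExtend d0 fresh := by
      rw [pvExtend_eq_filter srt d0, ← pvDistinct_eq shingles, ← hdst, hfr]
    rw [hg]
    simp only [hNfilter, hc']
    rw [pvExtend_getD_new fresh d0 s hfresh_nd hfresh_f hsf,
      pvBisect_eq_idxOf fresh s hfresh_lt hsf]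
    rfl

-- ===== VERDICT (by name: the statement is the Claim_ definition above) =====
theorem shingles_to_ints_local_spec : Claim_equal_shingles_to_ints_local := by
  intro shingles shingle_to_id _
  exact shingles_to_ints_local_spec_aux shingles shingle_to_id
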